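-- pv_equiv track=rewrite | github.com/saadrehman10/Compiler-Construction | wordSpliter.py | commaStringChecker
-- ===== SOURCE A (Python) =====
-- def commaStringChecker(array):# is function ma array ma check kar ta ha ka gha par " aya ha or us ka bad wala word ko remove kar ta ha
--     newArray1 = []
--     i = 0
--     while i < len(array):
--         if "\"" in array[i] or "\'" in array[i]:
--             quote = array[i]
--             newArray1.append(quote)
--             i += 1
--             while i < len(array) and array[i] != quote:
--                 newArray1[-1] += array[i]
--                 i += 1
--             if i < len(array):
--                 newArray1[-1] += array[i]
--         else:
--             newArray1.append(array[i])
--         i += 1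
--     return newArray1
-- ===== SOURCE B (Python) =====
-- def commaStringChecker(array):
--     # Search-and-join decomposition: instead of merging token by token, locate
--     # the closing quote with list.index and join the whole slice at once.
--     result = []
--     i = 0
--     n = len(array)
--     while i < n:
--         tok = array[i]
--         if '"' in tok or "'" in tok:
--             try:
--                 j = array.index(tok, i + 1)
--             except ValueError:
--                 j = n - 1
--             result.append("".join(array[i:j + 1]))
--             i = j + 1
--         else:
--             result.append(tok)
--             i += 1
--     return result
-- ===== Notes on version B (the rewrite author's own statement) =====
-- stated objective: alternative
-- what changed: Replaces A's character-accumulating nested while loops (repeated += onto result[-1]) by a search-and-join pass: the closing quote is located with list.index and the whole quoted slice is merged with one ''.join, jumping the index past it.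
import Mathlib
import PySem

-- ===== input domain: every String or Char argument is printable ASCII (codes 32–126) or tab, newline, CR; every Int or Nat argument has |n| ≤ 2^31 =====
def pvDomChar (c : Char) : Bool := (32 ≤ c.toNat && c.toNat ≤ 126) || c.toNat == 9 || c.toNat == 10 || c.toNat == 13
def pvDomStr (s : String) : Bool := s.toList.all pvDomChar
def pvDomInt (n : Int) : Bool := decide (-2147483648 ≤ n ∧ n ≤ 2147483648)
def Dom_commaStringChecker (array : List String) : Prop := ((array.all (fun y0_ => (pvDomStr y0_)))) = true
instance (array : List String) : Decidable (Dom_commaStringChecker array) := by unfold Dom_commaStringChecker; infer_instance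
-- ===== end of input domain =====

-- ===== PORT A =====
-- header: B replaces A's token-by-token += merge by a search-and-join pass (objective: alternative); return values proved equal.
-- aInner ports A's inner while loop: merge tokens onto acc until one equals q (which is merged too).
def aInner (q acc : String) : List String → String × List String
  | [] => (acc, [])
  | t :: rest => if t ≠ q then aInner q (acc ++ t) rest else (acc ++ t, rest)

theorem aInner_len (q acc : String) (l : List String) : (aInner q acc l).2.length ≤ l.length := by
  induction l generalizing acc with
  | nil => simp [aInner]
  | cons t rest ih =>
    simp only [aInner]
    split
    · exact Nat.le_succ_of_le (ih _)
    · simp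

def commaStringChecker (array : List String) : List String :=
  match array with
  | [] => []
  | t :: rest =>
    if PySem.Str.isIn "\"" t || PySem.Str.isIn "'" t then
      let p := aInner t t rest
      p.1 :: commaStringChecker p.2
    else t :: commaStringChecker rest
termination_by array.length
decreasing_by
  · exact Nat.lt_succ_of_le (aInner_len t t rest)
  · simp

-- ===== PORT B =====
-- closeIdx ports Source B's `try: j = array.index(tok, i+1) except ValueError: j = n-1`.
def closeIdx (array : List String) (i : Nat) (tok : String) : Nat :=
  match PySem.List.index? (array.drop (i + 1)) tok with
  | some k => i + 1 + k
  | none => array.length - 1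

theorem le_closeIdx (array : List String) (i : Nat) (tok : String) (h : i < array.length) :
    i ≤ closeIdx array i tok := by
  unfold closeIdx
  split <;> omega

-- bLoop ports Source B's while loop over the index i with accumulator `result`.
def bLoop (array : List String) (res : List String) (i : Nat) : List String :=
  if h : i < array.length then
    let tok := array[i]
    if PySem.Str.isIn "\"" tok || PySem.Str.isIn "'" tok then
      let j := closeIdx array i tok
      bLoop array (res ++ [PySem.Str.join "" ((array.drop i).take (j + 1 - i))]) (j + 1)
    else bLoop array (res ++ [tok]) (i + 1)
  else res
termination_by array.length - i
decreasing_by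
  · have := le_closeIdx array i array[i] h; omega
  · omega

def commaStringChecker_alt (array : List String) : List String :=
  bLoop array [] 0

-- ===== PRECONDITION & SPEC =====
def Spec_commaStringChecker (array : List String) (out : List String) : Prop := out = commaStringChecker_alt array
instance (array : List String) (out : List String) : Decidable (Spec_commaStringChecker array out) := by unfold Spec_commaStringChecker; infer_instance

-- ===== CLAIM (what is proved, stated in full; the proofs are below) =====
def Claim_equal_commaStringChecker : Prop := ∀ (array : List String), Dom_commaStringChecker array → Spec_commaStringChecker array (commaStringChecker array)

-- ===== LEMMAS AND PROOFS =====
theorem join_empty_nil : PySem.Str.join "" ([] : List String) = "" := rfl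

theorem join_empty_cons (x : String) (l : List String) :
    PySem.Str.join "" (x :: l) = x ++ PySem.Str.join "" l := by
  cases l with
  | nil =>
    rw [join_empty_nil]
    simp [PySem.Str.join, PySem.Chars.join, List.intercalate]
  | cons y t =>
    apply String.ext
    simp [PySem.Str.join, PySem.Chars.join, List.intercalate]

-- A's inner loop characterised by where (if anywhere) the closing quote sits.
theorem aInner_some (q : String) (rest : List String) (k : Nat)
    (h : PySem.List.index? rest q = some k) :
    ∀ acc, aInner q acc rest = (acc ++ PySem.Str.join "" (rest.take (k + 1)), rest.drop (k + 1)) := by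
  induction rest generalizing k with
  | nil => simp [PySem.List.index?] at h
  | cons t r ih =>
    intro acc
    by_cases ht : t = q
    · subst ht
      rw [PySem.List.index?_cons_self] at h
      cases h
      simp [aInner, join_empty_cons, join_empty_nil]
    · rw [PySem.List.index?_cons_of_ne r ht] at h
      cases hk : PySem.List.index? r q with
      | none => rw [hk] at h; simp at h
      | some k' =>
        rw [hk] at h
        simp only [Option.map_some] at h
        cases h
        simp only [aInner, ht, ne_eq, not_false_iff, if_pos]
        rw [ih k' hk]
        simp [join_empty_cons, String.append_assoc]

theorem aInner_none (q : String) (rest : List String)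
    (h : PySem.List.index? rest q = none) :
    ∀ acc, aInner q acc rest = (acc ++ PySem.Str.join "" rest, []) := by
  induction rest with
  | nil =>
    intro acc
    simp [aInner, join_empty_nil]
  | cons t r ih =>
    intro acc
    have ht : t ≠ q := by
      intro he; subst he; rw [PySem.List.index?_cons_self] at h; simp at h
    rw [PySem.List.index?_cons_of_ne r ht] at h
    simp only [Option.map_eq_none_iff] at h
    simp only [aInner, ht, ne_eq, not_false_iff, if_pos]
    rw [ih h]
    simp [join_empty_cons, String.append_assoc]

-- B's loop from index i produces exactly A's result on the suffix array.drop i.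
theorem bLoop_eq (array : List String) (n : Nat) :
    ∀ i res, array.length - i ≤ n →
      bLoop array res i = res ++ commaStringChecker (array.drop i) := by
  induction n with
  | zero =>
    intro i res h
    have hi : ¬ i < array.length := by omega
    rw [bLoop, dif_neg hi, List.drop_eq_nil_of_le (by omega)]
    simp [commaStringChecker]
  | succ n ih =>
    intro i res h
    by_cases hi : i < array.length
    · have hdrop : array.drop i = array[i] :: array.drop (i + 1) :=
        List.drop_eq_getElem_cons hi
      rw [bLoop, dif_pos hi]
      by_cases hq : (PySem.Str.isIn "\"" array[i] || PySem.Str.isIn "'" array[i]) = true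
      · simp only [hq, if_pos]
        conv_rhs => rw [hdrop]
        simp only [commaStringChecker, hq, if_pos]
        cases hk : PySem.List.index? (array.drop (i + 1)) array[i] with
        | some k =>
          have hj : closeIdx array i array[i] = i + 1 + k := by
            unfold closeIdx; rw [hk]
          rw [aInner_some _ _ _ hk, hj]
          have h2 : i + 1 + k + 1 - i = (k + 1) + 1 := by omega
          rw [hdrop, h2, List.take_succ_cons]
          have hdd : (array.drop (i + 1)).drop (k + 1) = array.drop (i + 1 + k + 1) := by
            rw [List.drop_drop]; congr 1
          rw [ih (i + 1 + k + 1) _ (by omega), join_empty_cons, hdd]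
          simp
        | none =>
          have hj : closeIdx array i array[i] = array.length - 1 := by
            unfold closeIdx; rw [hk]
          rw [aInner_none _ _ hk, hj]
          have h2 : array.length - 1 + 1 - i = (array.length - (i + 1)) + 1 := by omega
          have h1 : array.length - 1 + 1 = array.length := by omega
          rw [hdrop, h2, List.take_succ_cons,
              List.take_of_length_le (by simp), h1]
          rw [ih array.length _ (by omega), List.drop_length]
          simp [commaStringChecker]
          rw [hdrop, join_empty_cons]
      · simp only [hq, if_neg, Bool.not_eq_true]
        conv_rhs => rw [hdrop]
        simp only [commaStringChecker, hq, if_neg, Bool.not_eq_true]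
        rw [ih (i + 1) _ (by omega)]
        simp
    · rw [bLoop, dif_neg hi, List.drop_eq_nil_of_le (by omega)]
      simp [commaStringChecker]

-- ===== VERDICT (by name: the statement is the Claim_ definition above) =====
theorem commaStringChecker_spec : Claim_equal_commaStringChecker := by
  intro array _
  unfold Spec_commaStringChecker commaStringChecker_alt
  rw [bLoop_eq array array.length 0 [] (by omega)]
  simp
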